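-- pv_equiv track=rewrite | github.com/muhammadsufiyanbaig/streamchunk | streamchunk/partitioner.py | partition_dataset
-- ===== SOURCE A (Python) =====
-- from typing import Any, Callable, List, Optional, Sequence, Tuple
--
-- def partition_dataset(data: Sequence[Any], n_partitions: int) -> List[List[Any]]:
--     """
--     Split `data` into `n_partitions` roughly equal slices.
--
--     The first (total % n_partitions) partitions receive one extra row so
--     that every row is accounted for with no overlap or duplication.
--
--     Example:
--         partition_dataset(list(range(10)), 3)
--         --> [[0,1,2,3], [4,5,6], [7,8,9]]
--     """
--     if n_partitions <= 0:
--         raise ValueError("n_partitions must be >= 1")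
--
--     total = len(data)
--     base  = total // n_partitions
--     extra = total % n_partitions   # first `extra` partitions get one more row
--
--     partitions, start = [], 0
--     for i in range(n_partitions):
--         end = start + base + (1 if i < extra else 0)
--         partitions.append(list(data[start:end]))
--         start = end
--
--     return partitions
-- ===== SOURCE B (Python) =====
-- def partition_dataset(data, n_partitions):
--     """Group each element into the partition that owns it (owner computed by
--     piecewise integer division), instead of slicing contiguously with a
--     running start index."""
--     if n_partitions <= 0:
--         raise ValueError("n_partitions must be >= 1")
--     base, extra = divmod(len(data), n_partitions)
--     cut = extra * (base + 1)
--
--     def owner(j):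
--         return j // (base + 1) if j < cut else extra + (j - cut) // base
--
--     parts = [[] for _ in range(n_partitions)]
--     for j, x in enumerate(data):
--         parts[owner(j)].append(x)
--     return parts
-- ===== Notes on version B (the rewrite author's own statement) =====
-- stated objective: alternative
-- what changed: Instead of A's sequential contiguous slicing driven by a loop-carried start index, B computes for every element the index of the partition that owns it (a piecewise integer division: j//(base+1) in the oversized prefix, extra+(j-cut)//base after it) and distributes the elements into preallocated buckets in one pass over the data.
import Mathlib
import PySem

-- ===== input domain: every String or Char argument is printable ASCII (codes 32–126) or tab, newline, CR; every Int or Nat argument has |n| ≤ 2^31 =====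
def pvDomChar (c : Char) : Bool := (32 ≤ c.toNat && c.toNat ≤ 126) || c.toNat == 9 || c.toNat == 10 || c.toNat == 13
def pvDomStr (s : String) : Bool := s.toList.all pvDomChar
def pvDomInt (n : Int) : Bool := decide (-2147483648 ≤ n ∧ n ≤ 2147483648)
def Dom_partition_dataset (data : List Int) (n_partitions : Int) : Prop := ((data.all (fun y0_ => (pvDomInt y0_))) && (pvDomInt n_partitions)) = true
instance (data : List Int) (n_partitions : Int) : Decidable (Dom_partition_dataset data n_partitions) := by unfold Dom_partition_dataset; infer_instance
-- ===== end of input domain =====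

-- B groups each element by a computed owner-partition index (piecewise integer division) instead of A's sequential slicing with a running start (objective: alternative).


-- ===== PORT A =====
def partition_dataset (data : List Int) (n_partitions : Int) : List (List Int) :=
  if n_partitions ≤ 0 then []  -- Python raises ValueError here; excluded by Pre_
  else
    let total : Int := data.length
    let base := PySem.Int.floordiv total n_partitions
    let extra := PySem.Int.mod total n_partitions
    let st := (PySem.List.pyRange 0 n_partitions 1).foldl
      (fun (st : List (List Int) × Int) i =>
        let e := st.2 + base + (if i < extra then 1 else 0)
        (st.1 ++ [PySem.List.slice data (some st.2) (some e)], e))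
      (([] : List (List Int)), 0)
    st.1

-- ===== PORT B =====
def partition_dataset_alt (data : List Int) (n_partitions : Int) : List (List Int) :=
  if n_partitions ≤ 0 then []  -- Python raises ValueError here; excluded by Pre_
  else
    let base := PySem.Int.floordiv (data.length : Int) n_partitions
    let extra := PySem.Int.mod (data.length : Int) n_partitions
    let cut := extra * (base + 1)
    let owner : Int → Int := fun j =>
      if j < cut then PySem.Int.floordiv j (base + 1)
      else extra + PySem.Int.floordiv (j - cut) base
    let parts : List (List Int) := (PySem.List.pyRange 0 n_partitions 1).map (fun _ => ([] : List Int))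
    -- parts[owner(j)].append(x): ported as set/getD at index (owner j).toNat — exact here
    -- because owner j always lies in [0, n_partitions) for the indices j of data.
    (PySem.List.enumerate data 0).foldl
      (fun parts p =>
        parts.set (owner p.1).toNat (parts.getD (owner p.1).toNat [] ++ [p.2]))
      parts

-- ===== PRECONDITION & SPEC =====
-- Pre_ excludes exactly n_partitions ≤ 0, where the Python A raises ValueError.
def Pre_partition_dataset (data : List Int) (n_partitions : Int) : Prop := 0 < n_partitions
instance (data : List Int) (n_partitions : Int) : Decidable (Pre_partition_dataset data n_partitions) := by unfold Pre_partition_dataset; infer_instance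
def pvWitness_partition_dataset : List Int × Int := ([1, 2, 3, 4, 5], 2)

def Spec_partition_dataset (data : List Int) (n_partitions : Int) (out : List (List Int)) : Prop := out = partition_dataset_alt data n_partitions
instance (data : List Int) (n_partitions : Int) (out : List (List Int)) : Decidable (Spec_partition_dataset data n_partitions out) := by unfold Spec_partition_dataset; infer_instance

-- ===== CLAIM (what is proved, stated in full; the proofs are below) =====
def Claim_equal_partition_dataset : Prop := ∀ (data : List Int) (n_partitions : Int), Dom_partition_dataset data n_partitions → Pre_partition_dataset data n_partitions → Spec_partition_dataset data n_partitions (partition_dataset data n_partitions)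

-- ===== LEMMAS AND PROOFS =====

-- A's loop invariant: starting the fold at start = j*base + min j extra, the fold over
-- pyRange j n 1 appends exactly the closed-form slices for indices j..n-1.
theorem pv_loop_eq (data : List Int) (base extra : Int) :
    ∀ (fuel : Nat) (j n : Int), j ≤ n → (n - j).toNat = fuel →
    (PySem.List.pyRange j n 1).foldl
      (fun (st : List (List Int) × Int) i =>
        let e := st.2 + base + (if i < extra then 1 else 0)
        (st.1 ++ [PySem.List.slice data (some st.2) (some e)], e))
      (acc, j * base + min j extra)
    = (acc ++ (PySem.List.pyRange j n 1).map (fun i =>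
        PySem.List.slice data (some (i * base + min i extra)) (some ((i + 1) * base + min (i + 1) extra))),
       n * base + min n extra) := by
  intro fuel
  induction fuel generalizing acc with
  | zero =>
    intro j n hjn hf
    have h : j = n := by omega
    subst h
    simp [PySem.List.pyRange_one_eq_nil (le_refl j)]
  | succ k ih =>
    intro j n hjn hf
    have hlt : j < n := by omega
    rw [PySem.List.pyRange_one_cons hlt]
    simp only [List.foldl_cons, List.map_cons]
    have hmin : min (j + 1) extra = min j extra + (if j < extra then 1 else 0) := by
      split_ifs with h <;> omega
    have hstart : j * base + min j extra + base + (if j < extra then 1 else 0)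
        = (j + 1) * base + min (j + 1) extra := by
      rw [hmin]; ring
    rw [hstart]
    rw [ih (acc := acc ++ [PySem.List.slice data (some (j * base + min j extra))
          (some ((j + 1) * base + min (j + 1) extra))]) (j + 1) n (by omega) (by omega)]
    simp

-- The owner index of element j is k iff j lies in partition k's boundary interval.
theorem pv_owner_iff (base extra n j k : Int)
    (hb : 0 ≤ base) (hjt : j < base * n + extra) :
    ((if j < extra * (base + 1) then PySem.Int.floordiv j (base + 1)
      else extra + PySem.Int.floordiv (j - extra * (base + 1)) base) = k)
    ↔ (k * base + min k extra ≤ j ∧ j < (k + 1) * base + min (k + 1) extra) := by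
  have hcut_eq : extra * (base + 1) = extra * base + extra := by ring
  split_ifs with hcut
  · -- j < extra*(base+1): owner = j // (base+1)
    rw [PySem.Int.floordiv_eq_iff_of_pos (show (0:Int) < base + 1 by omega)]
    have e1 : k * (base + 1) = k * base + k := by ring
    have e2 : (k + 1) * (base + 1) = (k + 1) * base + (k + 1) := by ring
    constructor
    · rintro ⟨h1, h2⟩
      have hklt : k < extra := by
        rcases le_or_gt extra k with hE | hE
        · have hEE : extra * base ≤ k * base := mul_le_mul_of_nonneg_right hE hb
          omega
        · exact hE
      omega
    · rintro ⟨h1, h2⟩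
      have hklt : k < extra := by
        rcases le_or_gt extra k with hE | hE
        · have hEE : extra * base ≤ k * base := mul_le_mul_of_nonneg_right hE hb
          omega
        · exact hE
      omega
  · -- j ≥ extra*(base+1): owner = extra + (j - cut) // base
    have hbpos : 0 < base := by
      rcases eq_or_lt_of_le hb with h | h
      · exfalso
        have hz : extra * (base + 1) = extra := by rw [← h]; ring
        have hzz : base * n = 0 := by rw [← h]; ring
        omega
      · exact h
    have hiff := PySem.Int.floordiv_eq_iff_of_pos
      (a := j - extra * (base + 1)) (q := k - extra) hbpos
    have e1 : (k - extra) * base = k * base - extra * base := by ring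
    have e2 : (k - extra + 1) * base = k * base + base - extra * base := by ring
    have e4 : (k + 1) * base = k * base + base := by ring
    constructor
    · intro h
      have hq : PySem.Int.floordiv (j - extra * (base + 1)) base = k - extra := by omega
      obtain ⟨h1, h2⟩ := hiff.mp hq
      have hfd0 : 0 ≤ k - extra := by
        rw [← hq, PySem.Int.floordiv_eq_ediv_of_pos hbpos]
        exact Int.ediv_nonneg (by omega) (by omega)
      omega
    · rintro ⟨h1, h2⟩
      have hke : extra ≤ k := by
        rcases le_or_gt extra k with hE | hE
        · exact hE
        · exfalso
          have hEE : (k + 1) * base ≤ extra * base :=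
            mul_le_mul_of_nonneg_right (by omega) hb
          omega
      have hq : PySem.Int.floordiv (j - extra * (base + 1)) base = k - extra :=
        hiff.mpr (by omega)
      omega

-- Updating one slot of a map-over-range list is a map with a pointwise-updated function.
theorem pv_set_map_range {α : Type} (N m : Nat) (g : Nat → α) (v : α) :
    ((List.range N).map g).set m v = (List.range N).map (fun k => if k = m then v else g k) := by
  apply List.ext_getElem
  · simp
  · intro i h1 h2
    simp only [List.getElem_set, List.getElem_map, List.getElem_range]
    by_cases h : i = m
    · subst h; simp
    · simp [h, Ne.symm h]

theorem pv_getD_map_range {α : Type} (N m : Nat) (g : Nat → α) (d : α) (hm : m < N) :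
    ((List.range N).map g).getD m d = g m := by
  simp [List.getD, hm]

-- The owner index is always a valid partition index.
theorem pv_owner_bounds (base extra n j : Int)
    (hb : 0 ≤ base) (he : 0 ≤ extra) (hen : extra < n)
    (hj0 : 0 ≤ j) (hjt : j < base * n + extra) :
    0 ≤ (if j < extra * (base + 1) then PySem.Int.floordiv j (base + 1)
         else extra + PySem.Int.floordiv (j - extra * (base + 1)) base)
    ∧ (if j < extra * (base + 1) then PySem.Int.floordiv j (base + 1)
       else extra + PySem.Int.floordiv (j - extra * (base + 1)) base) < n := by
  have hcut_eq : extra * (base + 1) = extra * base + extra := by ring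
  split_ifs with hcut
  · have h0 : 0 ≤ PySem.Int.floordiv j (base + 1) := by
      rw [PySem.Int.floordiv_eq_ediv_of_pos (by omega)]
      exact Int.ediv_nonneg hj0 (by omega)
    have hlt : PySem.Int.floordiv j (base + 1) < extra :=
      (PySem.Int.floordiv_lt_iff_lt_mul (by omega)).mpr (by omega)
    omega
  · have hbpos : 0 < base := by
      rcases eq_or_lt_of_le hb with h | h
      · exfalso
        have hz : extra * (base + 1) = extra := by rw [← h]; ring
        have hzz : base * n = 0 := by rw [← h]; ring
        omega
      · exact h
    have h0 : 0 ≤ PySem.Int.floordiv (j - extra * (base + 1)) base := by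
      rw [PySem.Int.floordiv_eq_ediv_of_pos hbpos]
      exact Int.ediv_nonneg (by omega) (by omega)
    have hlt : PySem.Int.floordiv (j - extra * (base + 1)) base < n - extra := by
      rw [PySem.Int.floordiv_lt_iff_lt_mul hbpos]
      have e1 : (n - extra) * base = base * n - extra * base := by ring
      omega
    omega

-- One pass appending each element to its owner's bucket builds, per partition k,
-- exactly the elements whose owner is k.
theorem pv_fold_buckets (owner : Int → Int) (N : Nat) :
    ∀ (l : List (Int × Int)) (g : Nat → List Int),
    (∀ p ∈ l, 0 ≤ owner p.1 ∧ owner p.1 < (N : Int)) →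
    l.foldl (fun parts p =>
        parts.set (owner p.1).toNat (parts.getD (owner p.1).toNat [] ++ [p.2]))
      ((List.range N).map g)
    = (List.range N).map (fun k =>
        g k ++ (l.filter (fun p => owner p.1 == (k : Int))).map (fun p => p.2)) := by
  intro l
  induction l with
  | nil => intro g _; simp
  | cons p l ih =>
    intro g hbound
    obtain ⟨hp0, hpN⟩ := hbound p (List.mem_cons_self)
    have hm : (owner p.1).toNat < N := by omega
    have hcast : ((owner p.1).toNat : Int) = owner p.1 := Int.toNat_of_nonneg hp0
    simp only [List.foldl_cons]
    rw [pv_getD_map_range N _ g [] hm, pv_set_map_range]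
    rw [ih _ (fun q hq => hbound q (List.mem_cons_of_mem p hq))]
    apply List.map_congr_left
    intro k hk
    simp only [List.filter_cons]
    by_cases hkm : k = (owner p.1).toNat
    · subst hkm
      simp [hcast, List.append_assoc]
    · have hbeq : (owner p.1 == ((k : Nat) : Int)) = false := by
        rw [beq_eq_false_iff_ne]
        intro hEq
        exact hkm (by omega)
      simp [hbeq, hkm]

-- Selecting the elements whose index lies in [a, b) is the contiguous segment drop a / take (b-a).
theorem pv_filter_interval {α : Type} (xs : List α) (p : Int → Bool) (a b : Nat)
    (hab : a ≤ b) (hbl : b ≤ xs.length)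
    (hp : ∀ j : Nat, j < xs.length → (p (j : Int) = true ↔ (a ≤ j ∧ j < b))) :
    ((PySem.List.enumerate xs 0).filter (fun q => p q.1)).map (fun q => q.2)
      = (xs.drop a).take (b - a) := by
  have hsplit : xs.take a ++ ((xs.drop a).take (b - a) ++ xs.drop b) = xs := by
    rw [← List.append_assoc, ← List.take_add, Nat.add_sub_cancel' hab, List.take_append_drop]
  conv_lhs => rw [← hsplit]
  rw [PySem.List.enumerate_append, PySem.List.enumerate_append]
  have hla : (xs.take a).length = a := by
    rw [List.length_take]; omega
  have hlm : ((xs.drop a).take (b - a)).length = b - a := by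
    rw [List.length_take, List.length_drop]; omega
  rw [List.filter_append, List.filter_append]
  have h1 : (PySem.List.enumerate (xs.take a) 0).filter (fun q => p q.1) = [] := by
    apply List.filter_eq_nil_iff.mpr
    intro q hq
    obtain ⟨i, hi, rfl⟩ := (PySem.List.mem_enumerate_iff _ _ _).mp hq
    have hil : i < a := by omega
    have : ¬ (p (i : Int) = true) := by
      rw [hp i (by omega)]; omega
    simpa using this
  have h2 : (PySem.List.enumerate ((xs.drop a).take (b - a)) (0 + ↑(xs.take a).length)).filter
      (fun q => p q.1) = PySem.List.enumerate ((xs.drop a).take (b - a)) (0 + ↑(xs.take a).length) := by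
    apply List.filter_eq_self.mpr
    intro q hq
    obtain ⟨i, hi, rfl⟩ := (PySem.List.mem_enumerate_iff _ _ _).mp hq
    rw [hlm] at hi
    have : ((0 : Int) + ↑(xs.take a).length + ↑i) = ((a + i : Nat) : Int) := by
      rw [hla]; push_cast; ring
    rw [this]
    simp only []
    rw [hp (a + i) (by omega)]
    omega
  have h3 : (PySem.List.enumerate (xs.drop b) (0 + ↑(xs.take a).length +
      ↑((xs.drop a).take (b - a)).length)).filter (fun q => p q.1) = [] := by
    apply List.filter_eq_nil_iff.mpr
    intro q hq
    obtain ⟨i, hi, rfl⟩ := (PySem.List.mem_enumerate_iff _ _ _).mp hq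
    rw [List.length_drop] at hi
    have : ((0 : Int) + ↑(xs.take a).length + ↑((xs.drop a).take (b - a)).length + ↑i)
        = ((b + i : Nat) : Int) := by
      rw [hla, hlm]; push_cast; omega
    rw [this]
    have : ¬ (p ((b + i : Nat) : Int) = true) := by
      rw [hp (b + i) (by omega)]; omega
    simpa using this
  rw [h1, h2, h3]
  simp [PySem.List.map_snd_enumerate]

-- ===== VERDICT (by name: the statement is the Claim_ definition above) =====
theorem partition_dataset_spec : Claim_equal_partition_dataset := by
  intro data n hdom hpre
  unfold Spec_partition_dataset partition_dataset partition_dataset_alt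
  have hn : ¬ n ≤ 0 := by exact not_le.mpr hpre
  simp only [hn, if_false]
  set base := PySem.Int.floordiv (data.length : Int) n with hbase
  set extra := PySem.Int.mod (data.length : Int) n with hextra
  have he0 : 0 ≤ extra := PySem.Int.mod_nonneg _ hpre
  have hen : extra < n := PySem.Int.mod_lt _ hpre
  have hb0 : 0 ≤ base := by
    rw [hbase, PySem.Int.floordiv_eq_ediv_of_pos hpre]
    exact Int.ediv_nonneg (by positivity) (by omega)
  have htot : base * n + extra = (data.length : Int) :=
    PySem.Int.floordiv_mul_add_mod (data.length : Int) n
  have key := pv_loop_eq data base extra (acc := []) n.toNat 0 n (by omega) (by omega)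
  rw [zero_mul, zero_add, min_eq_left he0] at key
  rw [key]
  simp only [List.nil_append]
  -- rewrite both pyRanges as maps over List.range
  have hn' : n = ((n.toNat : Nat) : Int) := by omega
  rw [hn', PySem.List.pyRange_zero_natCast, List.map_map, List.map_map]
  set N := n.toNat with hN
  -- characterize B's bucket-filling fold
  have hbounds : ∀ p ∈ PySem.List.enumerate data 0,
      0 ≤ (if p.1 < extra * (base + 1) then PySem.Int.floordiv p.1 (base + 1)
           else extra + PySem.Int.floordiv (p.1 - extra * (base + 1)) base)
      ∧ (if p.1 < extra * (base + 1) then PySem.Int.floordiv p.1 (base + 1)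
         else extra + PySem.Int.floordiv (p.1 - extra * (base + 1)) base) < (N : Int) := by
    intro p hp
    obtain ⟨i, hi, rfl⟩ := (PySem.List.mem_enumerate_iff _ _ _).mp hp
    dsimp only
    have := pv_owner_bounds base extra n (0 + (i : Int)) hb0 he0 hen (by omega) (by omega)
    omega
  have hbuck := pv_fold_buckets
    (fun j => if j < extra * (base + 1) then PySem.Int.floordiv j (base + 1)
              else extra + PySem.Int.floordiv (j - extra * (base + 1)) base) N
    (PySem.List.enumerate data 0) (fun _ => ([] : List Int)) hbounds
  simp only [Function.comp_def]
  rw [hbuck]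
  apply List.map_congr_left
  intro k hk
  have hkN : k < N := List.mem_range.mp hk
  have hk0 : (0 : Int) ≤ (k : Int) := Int.natCast_nonneg k
  have hkn : (k : Int) < n := by omega
  simp only [List.nil_append]
  -- boundary values as naturals
  have hs0 : 0 ≤ (k : Int) * base + min (k : Int) extra := by
    have := mul_nonneg hk0 hb0
    omega
  have hmono : (k : Int) * base + min (k : Int) extra
      ≤ ((k : Int) + 1) * base + min ((k : Int) + 1) extra := by
    have : (k : Int) * base ≤ ((k : Int) + 1) * base :=
      mul_le_mul_of_nonneg_right (by omega) hb0
    omega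
  have hub : ((k : Int) + 1) * base + min ((k : Int) + 1) extra ≤ (data.length : Int) := by
    have h1 : ((k : Int) + 1) * base ≤ n * base := mul_le_mul_of_nonneg_right (by omega) hb0
    have h2 : n * base = base * n := by ring
    omega
  set a : Nat := ((k : Int) * base + min (k : Int) extra).toNat with ha
  set b : Nat := (((k : Int) + 1) * base + min ((k : Int) + 1) extra).toNat with hbn
  have hca : ((a : Int)) = (k : Int) * base + min (k : Int) extra := Int.toNat_of_nonneg hs0
  have hcb : ((b : Int)) = ((k : Int) + 1) * base + min ((k : Int) + 1) extra :=
    Int.toNat_of_nonneg (by omega)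
  rw [← hca, ← hcb, PySem.List.slice_natCast]
  have hp' : ∀ j : Nat, j < data.length →
      ((((if (j : Int) < extra * (base + 1) then PySem.Int.floordiv (j : Int) (base + 1)
          else extra + PySem.Int.floordiv ((j : Int) - extra * (base + 1)) base) == ((k : Nat) : Int)) = true)
        ↔ (a ≤ j ∧ j < b)) := by
    intro j hjl
    rw [beq_iff_eq]
    rw [pv_owner_iff base extra n (j : Int) (k : Int) hb0 (by omega)]
    omega
  exact (pv_filter_interval data
    (fun j => ((if j < extra * (base + 1) then PySem.Int.floordiv j (base + 1)
      else extra + PySem.Int.floordiv (j - extra * (base + 1)) base) == ((k : Nat) : Int)))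
    a b (by omega) (by omega) hp').symm
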